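-- pv_equiv track=rewrite | github.com/wbieniec/controlled-plag-check | test6_all/A_inj(0.8,0.8,0.8)_ren(0.800)_fs(0.8).py | esteemed_sanity
-- ===== SOURCE A (Python) =====
-- def esteemed_sanity(ikgnjygy):
--     max_diff = 0
--     best_pair = None
--     for first, second in ikgnjygy:
--         cur_diff = second - first
--         if cur_diff > max_diff:
--             max_diff = cur_diff
--             best_pair = (first, second)
--     return best_pair
-- ===== SOURCE B (Python) =====
-- def esteemed_sanity(ikgnjygy):
--     diffs = [second - first for first, second in ikgnjygy]
--     if not diffs:
--         return None
--     m = max(diffs)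
--     if m <= 0:
--         return None
--     for first, second in ikgnjygy:
--         if second - first == m:
--             return (first, second)
-- ===== Notes on version B (the rewrite author's own statement) =====
-- stated objective: alternative
-- what changed: Replaced A's single-pass threshold-tracking loop (running max_diff with strict-> updates) by a two-phase decomposition: build the list of differences, take its max, and return the first pair achieving it when that max is positive, else None.
import Mathlib
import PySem

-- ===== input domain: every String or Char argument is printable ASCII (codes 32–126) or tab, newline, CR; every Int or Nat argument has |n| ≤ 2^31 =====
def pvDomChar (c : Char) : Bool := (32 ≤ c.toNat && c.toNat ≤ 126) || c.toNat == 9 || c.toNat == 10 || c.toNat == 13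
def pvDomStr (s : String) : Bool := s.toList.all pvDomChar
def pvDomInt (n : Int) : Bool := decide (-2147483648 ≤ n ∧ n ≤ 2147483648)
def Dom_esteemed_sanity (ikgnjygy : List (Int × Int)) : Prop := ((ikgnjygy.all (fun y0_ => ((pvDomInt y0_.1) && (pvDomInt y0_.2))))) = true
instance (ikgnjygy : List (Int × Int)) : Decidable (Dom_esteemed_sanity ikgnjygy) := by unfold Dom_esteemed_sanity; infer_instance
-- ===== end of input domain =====

-- B replaces A's single-pass threshold loop by two phases (max of the diffs, then first pair
-- achieving it): an alternative decomposition of the same cost, not claimed faster.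

-- ===== PORT A =====
-- A: one pass, state (max_diff, best_pair), update on strict 'cur_diff > max_diff'.
def esteemed_sanity (ikgnjygy : List (Int × Int)) : Option (Int × Int) :=
  (ikgnjygy.foldl
    (fun acc p =>
      if p.2 - p.1 > acc.1 then (p.2 - p.1, some p) else acc)
    ((0 : Int), (none : Option (Int × Int)))).2

-- ===== PORT B =====
-- B: diffs = [second - first …]; empty → None; m = max(diffs); m ≤ 0 → None;
--    else the first pair with second - first == m (the for/return loop = find?).
def esteemed_sanity_alt (ikgnjygy : List (Int × Int)) : Option (Int × Int) :=
  let diffs := ikgnjygy.map (fun p => p.2 - p.1)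
  match PySem.List.max? diffs (fun y => y) with
  | none => none
  | some m => if m ≤ 0 then none else ikgnjygy.find? (fun p => p.2 - p.1 == m)

-- ===== PRECONDITION & SPEC =====
def Spec_esteemed_sanity (ikgnjygy : List (Int × Int)) (out : Option (Int × Int)) : Prop := out = esteemed_sanity_alt ikgnjygy
instance (ikgnjygy : List (Int × Int)) (out : Option (Int × Int)) : Decidable (Spec_esteemed_sanity ikgnjygy out) := by unfold Spec_esteemed_sanity; infer_instance

-- ===== CLAIM (what is proved, stated in full; the proofs are below) =====
def Claim_equal_esteemed_sanity : Prop := ∀ (ikgnjygy : List (Int × Int)), Dom_esteemed_sanity ikgnjygy → Spec_esteemed_sanity ikgnjygy (esteemed_sanity ikgnjygy)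

-- ===== LEMMAS AND PROOFS =====

-- running max of the projection p.2 - p.1
def dmax (a : Int) (p : Int × Int) : Int := max a (p.2 - p.1)

theorem foldl_dmax_le (t : List (Int × Int)) (a c : Int) (ha : a ≤ c)
    (h : ∀ p ∈ t, p.2 - p.1 ≤ c) : t.foldl dmax a ≤ c := by
  induction t generalizing a with
  | nil => simpa using ha
  | cons x s ih =>
    simp only [List.foldl_cons]
    exact ih (max a (x.2 - x.1))
      (max_le ha (h x (by simp)))
      (fun p hp => h p (by simp [hp]))

theorem le_foldl_dmax (t : List (Int × Int)) (a : Int) :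
    a ≤ t.foldl dmax a ∧ ∀ p ∈ t, p.2 - p.1 ≤ t.foldl dmax a := by
  induction t generalizing a with
  | nil => simp
  | cons x s ih =>
    simp only [List.foldl_cons]
    refine ⟨le_trans (le_max_left _ _) (ih (dmax a x)).1, ?_⟩
    intro p hp
    rcases List.mem_cons.mp hp with h | hp
    · rw [h]; exact le_trans (le_max_right _ _) (ih (dmax a x)).1
    · exact (ih (dmax a x)).2 p hp

theorem foldl_dmax_max (t : List (Int × Int)) (a b : Int) :
    t.foldl dmax (max a b) = max (t.foldl dmax a) b := by
  induction t generalizing a with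
  | nil => simp
  | cons x s ih =>
    simp only [List.foldl_cons, dmax]
    rw [max_right_comm a b (x.2 - x.1), ih]

theorem foldl_dmax_of_all_le (t : List (Int × Int)) (a : Int)
    (h : ∀ p ∈ t, p.2 - p.1 ≤ a) : t.foldl dmax a = a :=
  le_antisymm (foldl_dmax_le t a a le_rfl h) (le_foldl_dmax t a).1

-- A's loop, characterised: the running max is `foldl dmax m`, and the best pair becomes the
-- FIRST pair achieving that max as soon as some diff strictly exceeds the initial threshold.
theorem loopA_char (l : List (Int × Int)) (m : Int) (b : Option (Int × Int)) :
    l.foldl (fun acc p => if p.2 - p.1 > acc.1 then (p.2 - p.1, some p) else acc) (m, b)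
      = (l.foldl dmax m,
         if l.any (fun p => decide (p.2 - p.1 > m)) then
           l.find? (fun p => p.2 - p.1 == l.foldl dmax m)
         else b) := by
  induction l generalizing m b with
  | nil => simp
  | cons x t ih =>
    simp only [List.foldl_cons, List.any_cons, List.find?]
    by_cases hx : x.2 - x.1 > m
    · rw [if_pos hx, ih (x.2 - x.1) (some x)]
      have hd : dmax m x = x.2 - x.1 := by
        simp [dmax]; omega
      rw [hd]
      by_cases ht : t.any (fun p => decide (p.2 - p.1 > x.2 - x.1))
      · -- some later diff strictly exceeds dx: the overall max exceeds dx, so x is skipped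
        obtain ⟨q, hq, hq2⟩ := List.any_eq_true.mp ht
        have hlt : x.2 - x.1 < t.foldl dmax (x.2 - x.1) :=
          lt_of_lt_of_le (by exact_mod_cast of_decide_eq_true hq2)
            ((le_foldl_dmax t (x.2 - x.1)).2 q hq)
        have hne : (x.2 - x.1 == t.foldl dmax (x.2 - x.1)) = false := by
          simp; omega
        simp only [ht, if_true, hne]
        have : (x.2 - x.1 > m) = True := by simp [hx]
        simp [hx]
      · -- no later diff exceeds dx: the overall max IS dx and x is its first achiever
        have hall : ∀ p ∈ t, p.2 - p.1 ≤ x.2 - x.1 := by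
          intro p hp
          by_contra hc
          exact ht (List.any_eq_true.mpr ⟨p, hp, by simp; omega⟩)
        have hfix : t.foldl dmax (x.2 - x.1) = x.2 - x.1 := foldl_dmax_of_all_le t _ hall
        simp only [ht, hfix]
        simp [hx]
    · rw [if_neg hx, ih m b]
      have hd : dmax m x = m := by simp [dmax]; omega
      rw [hd]
      have hxd : decide (x.2 - x.1 > m) = false := by simp; omega
      rw [hxd]
      simp only [Bool.false_or]
      by_cases ht : t.any (fun p => decide (p.2 - p.1 > m))
      · -- the max strictly exceeds m ≥ dx, so find? skips x
        obtain ⟨q, hq, hq2⟩ := List.any_eq_true.mp ht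
        have hlt : m < t.foldl dmax m :=
          lt_of_lt_of_le (by exact_mod_cast of_decide_eq_true hq2)
            ((le_foldl_dmax t m).2 q hq)
        have hne : (x.2 - x.1 == t.foldl dmax m) = false := by
          simp; omega
        simp [ht, hne]
      · simp [ht]

theorem foldl_dmax_map (t : List (Int × Int)) (a : Int) :
    (t.map (fun p => p.2 - p.1)).foldl max a = t.foldl dmax a := by
  induction t generalizing a with
  | nil => rfl
  | cons x s ih => simp [List.foldl_cons, dmax, ih]

-- ===== VERDICT (by name: the statement is the Claim_ definition above) =====
theorem esteemed_sanity_spec : Claim_equal_esteemed_sanity := by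
  intro l _
  show esteemed_sanity l = esteemed_sanity_alt l
  cases l with
  | nil => rfl
  | cons x t =>
    unfold esteemed_sanity esteemed_sanity_alt
    rw [loopA_char]
    simp only [List.map_cons, PySem.List.max?_id_cons, foldl_dmax_map]
    set M1 := t.foldl dmax (x.2 - x.1) with hM1
    have hM0 : (x :: t).foldl dmax 0 = max M1 0 := by
      have : dmax 0 x = max (x.2 - x.1) 0 := by simp [dmax]; omega
      simp only [List.foldl_cons, this, foldl_dmax_max, hM1]
    by_cases hpos : (x :: t).any (fun p => decide (p.2 - p.1 > 0))
    · -- some positive diff: both return the first achiever of the (positive) max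
      obtain ⟨q, hq, hq2⟩ := List.any_eq_true.mp hpos
      have hqpos : (0 : Int) < q.2 - q.1 := by exact_mod_cast of_decide_eq_true hq2
      have hqle : q.2 - q.1 ≤ M1 := by
        rcases List.mem_cons.mp hq with rfl | hq'
        · exact (le_foldl_dmax t (q.2 - q.1)).1
        · exact (le_foldl_dmax t (x.2 - x.1)).2 q hq'
      have hM1pos : (0 : Int) < M1 := lt_of_lt_of_le hqpos hqle
      have hmax : max M1 0 = M1 := by omega
      simp only [hpos, if_true, hM0, hmax]
      rw [if_neg (by omega : ¬ M1 ≤ 0)]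
    · -- no positive diff: A keeps (0, None), B's max is ≤ 0
      have hall : ∀ p ∈ x :: t, p.2 - p.1 ≤ 0 := by
        intro p hp
        by_contra hc
        exact hpos (List.any_eq_true.mpr ⟨p, hp, by simp; omega⟩)
      have hM1le : M1 ≤ 0 :=
        foldl_dmax_le t (x.2 - x.1) 0 (hall x (by simp)) (fun p hp => hall p (by simp [hp]))
      simp only [Bool.not_eq_true] at hpos
      simp only [hpos, if_false, Bool.false_eq_true]
      rw [if_pos hM1le]
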